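-- pv_equiv track=rewrite | github.com/ryurukov2/walletTracker | walletTracker/wallet/utils/data_processing.py | combine_records
-- ===== SOURCE A (Python) =====
-- def combine_records(token_tx, internal_tx, normal_tx):
--     'Combines records from the three types of transactions'
--     combined_data = {}
--
--     def add_entry(entry):
--         hash_value = entry['hash']
--         hash_list = combined_data.setdefault(hash_value, {})
--         hash_list[len(hash_list)] = entry
--
--     for dataset in [token_tx, internal_tx, normal_tx]:
--         for entry in dataset['result']:
--             add_entry(entry)
--
--     return combined_data
-- ===== SOURCE B (Python) =====
-- def combine_records(token_tx, internal_tx, normal_tx):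
--     'Combines records from the three types of transactions'
--     entries = token_tx['result'] + internal_tx['result'] + normal_tx['result']
--     order = []
--     for entry in entries:
--         h = entry['hash']
--         if h not in order:
--             order.append(h)
--     return {h: dict(enumerate(e for e in entries if e['hash'] == h))
--             for h in order}
-- ===== Notes on version B (the rewrite author's own statement) =====
-- stated objective: alternative
-- what changed: B flattens the three result lists into one, computes the first-occurrence hash order, and then builds each inner index dict by rescanning the flat list with a per-hash filter plus enumerate; A makes a single bucketing pass that mutates nested index dicts in place via setdefault and len-keyed insertion.
import Mathlib
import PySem

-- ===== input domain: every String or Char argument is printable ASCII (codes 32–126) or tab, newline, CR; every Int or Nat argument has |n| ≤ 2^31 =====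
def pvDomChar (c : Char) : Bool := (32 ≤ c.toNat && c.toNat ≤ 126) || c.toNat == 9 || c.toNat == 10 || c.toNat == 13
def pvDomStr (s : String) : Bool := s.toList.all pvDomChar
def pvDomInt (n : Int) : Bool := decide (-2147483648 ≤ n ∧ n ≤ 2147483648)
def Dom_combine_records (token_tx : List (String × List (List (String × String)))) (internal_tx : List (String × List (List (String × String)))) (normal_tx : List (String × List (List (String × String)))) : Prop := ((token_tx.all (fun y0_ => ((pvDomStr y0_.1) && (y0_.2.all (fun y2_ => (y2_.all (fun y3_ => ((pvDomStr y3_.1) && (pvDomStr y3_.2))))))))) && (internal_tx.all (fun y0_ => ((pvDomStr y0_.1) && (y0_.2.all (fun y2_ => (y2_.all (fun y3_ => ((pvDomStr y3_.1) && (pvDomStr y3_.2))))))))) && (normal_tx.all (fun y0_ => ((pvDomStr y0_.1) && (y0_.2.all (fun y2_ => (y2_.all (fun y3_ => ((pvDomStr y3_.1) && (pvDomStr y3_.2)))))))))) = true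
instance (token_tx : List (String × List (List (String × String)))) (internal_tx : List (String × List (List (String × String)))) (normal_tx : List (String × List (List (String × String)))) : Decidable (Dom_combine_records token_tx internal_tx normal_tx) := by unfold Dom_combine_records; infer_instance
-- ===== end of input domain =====

-- B replaces A's single bucketing pass (nested index dicts mutated via setdefault) by a
-- flatten / first-occurrence key order / per-hash filter-and-enumerate decomposition
-- (objective: alternative; same return value, different traversal).

-- ===== PORT A =====
-- entry['hash'] (Pre_ guarantees the key is present; outside Pre_ Python raises KeyError)
def pvHash (e : List (String × String)) : String :=
  (PySem.Dict.mk e).getD "hash" ""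

-- add_entry: hash_list = combined_data.setdefault(h, {}); hash_list[len(hash_list)] = entry
def pvAddEntry (d : PySem.Dict String (PySem.Dict Int (List (String × String))))
    (e : List (String × String)) : PySem.Dict String (PySem.Dict Int (List (String × String))) :=
  let h := pvHash e
  let d1 := d.setdefault h PySem.Dict.empty
  let hl := d1.getD h PySem.Dict.empty
  d1.insert h (hl.insert (hl.size : Int) e)

def combine_records (token_tx : List (String × List (List (String × String)))) (internal_tx : List (String × List (List (String × String)))) (normal_tx : List (String × List (List (String × String)))) : List (String × List (Int × List (String × String))) :=
  let combined := [token_tx, internal_tx, normal_tx].foldl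
    (fun d ds => ((PySem.Dict.mk ds).getD "result" []).foldl pvAddEntry d) PySem.Dict.empty
  combined.items.map (fun p => (p.1, p.2.items))

-- ===== PORT B =====
-- dict(enumerate(lst)) as an association list, indices counted from i
def pvEnumFrom {α : Type} : Nat → List α → List (Int × α)
  | _, [] => []
  | i, x :: xs => ((i : Int), x) :: pvEnumFrom (i + 1) xs

def combine_records_alt (token_tx : List (String × List (List (String × String)))) (internal_tx : List (String × List (List (String × String)))) (normal_tx : List (String × List (List (String × String)))) : List (String × List (Int × List (String × String))) :=
  let entries := (PySem.Dict.mk token_tx).getD "result" []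
    ++ (PySem.Dict.mk internal_tx).getD "result" []
    ++ (PySem.Dict.mk normal_tx).getD "result" []
  let order := entries.foldl
    (fun o e => if o.contains (pvHash e) then o else o ++ [pvHash e]) []
  order.map (fun h => (h, pvEnumFrom 0 (entries.filter (fun e => pvHash e == h))))

-- ===== PRECONDITION & SPEC =====
-- Pre_: each of the three dicts has a "result" key and every entry in that list has a "hash"
-- key — exactly where Python A returns instead of raising KeyError.
def Pre_combine_records (token_tx : List (String × List (List (String × String)))) (internal_tx : List (String × List (List (String × String)))) (normal_tx : List (String × List (List (String × String)))) : Prop :=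
  ∀ d ∈ [token_tx, internal_tx, normal_tx],
    (PySem.Dict.mk d).contains "result" = true ∧
    ∀ e ∈ (PySem.Dict.mk d).getD "result" [], (PySem.Dict.mk e).contains "hash" = true
instance (token_tx : List (String × List (List (String × String)))) (internal_tx : List (String × List (List (String × String)))) (normal_tx : List (String × List (List (String × String)))) : Decidable (Pre_combine_records token_tx internal_tx normal_tx) := by unfold Pre_combine_records; infer_instance

def pvWitness_combine_records : (List (String × List (List (String × String)))) × (List (String × List (List (String × String)))) × (List (String × List (List (String × String)))) :=
  ([("result", [[("hash", "a"), ("value", "1")], [("hash", "b")]])],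
   [("result", [[("hash", "a")]])],
   [("result", [])])

def Spec_combine_records (token_tx : List (String × List (List (String × String)))) (internal_tx : List (String × List (List (String × String)))) (normal_tx : List (String × List (List (String × String)))) (out : List (String × List (Int × List (String × String)))) : Prop := out = combine_records_alt token_tx internal_tx normal_tx
instance (token_tx : List (String × List (List (String × String)))) (internal_tx : List (String × List (List (String × String)))) (normal_tx : List (String × List (List (String × String)))) (out : List (String × List (Int × List (String × String)))) : Decidable (Spec_combine_records token_tx internal_tx normal_tx out) := by unfold Spec_combine_records; infer_instance

-- ===== CLAIM (what is proved, stated in full; the proofs are below) =====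
def Claim_equal_combine_records : Prop := ∀ (token_tx : List (String × List (List (String × String)))) (internal_tx : List (String × List (List (String × String)))) (normal_tx : List (String × List (List (String × String)))), Dom_combine_records token_tx internal_tx normal_tx → Pre_combine_records token_tx internal_tx normal_tx → Spec_combine_records token_tx internal_tx normal_tx (combine_records token_tx internal_tx normal_tx)

-- ===== LEMMAS AND PROOFS =====

-- proof-only bridge: A's per-entry step on a grouping state of plain lists
def pvGroupStep (g : PySem.Dict String (List (List (String × String))))
    (e : List (String × String)) : PySem.Dict String (List (List (String × String))) :=
  let h := pvHash e
  if g.contains h then g.insert h (g.getD h [] ++ [e]) else g.insert h [e]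

-- ED l: the inner index dict A keeps for a hash whose grouped entry list is l
def pvED (l : List (List (String × String))) : PySem.Dict Int (List (String × String)) :=
  PySem.Dict.mk (pvEnumFrom 0 l)

-- Φ g: A's nested-dict state corresponding to the grouping state g
def pvPhi (g : PySem.Dict String (List (List (String × String)))) :
    PySem.Dict String (PySem.Dict Int (List (String × String))) :=
  PySem.Dict.mk (g.items.map (fun p => (p.1, pvED p.2)))

-- first-occurrence order of the hashes of l (Source B's 'order' loop)
def pvKeyOrder (l : List (List (String × String))) : List String :=
  l.foldl (fun o e => if o.contains (pvHash e) then o else o ++ [pvHash e]) []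

theorem pvEnumFrom_length {α : Type} (i : Nat) (l : List α) :
    (pvEnumFrom i l).length = l.length := by
  induction l generalizing i with
  | nil => rfl
  | cons x xs ih => simp [pvEnumFrom, ih]

theorem pvEnumFrom_append {α : Type} (i : Nat) (l : List α) (e : α) :
    pvEnumFrom i (l ++ [e]) = pvEnumFrom i l ++ [(((i + l.length : Nat) : Int), e)] := by
  induction l generalizing i with
  | nil => simp [pvEnumFrom]
  | cons x xs ih => simp [pvEnumFrom, ih, Nat.add_assoc, Nat.add_comm 1]

theorem pvEnumFrom_key_lt {α : Type} (i : Nat) (l : List α) :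
    ∀ p ∈ pvEnumFrom i l, p.1 < ((i + l.length : Nat) : Int) := by
  induction l generalizing i with
  | nil => simp [pvEnumFrom]
  | cons x xs ih =>
    intro p hp
    simp only [pvEnumFrom, List.mem_cons] at hp
    rcases hp with rfl | hp
    · simp only [List.length_cons]; push_cast; omega
    · have := ih (i + 1) p hp
      simp only [List.length_cons]
      push_cast at this ⊢
      omega

theorem pvED_insert (l : List (List (String × String))) (e : List (String × String)) :
    (pvED l).insert ((l.length : Nat) : Int) e = pvED (l ++ [e]) := by
  have hc : (pvED l).contains ((l.length : Nat) : Int) = false := by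
    simp only [PySem.Dict.contains, pvED, List.any_eq_false]
    intro p hp
    have := pvEnumFrom_key_lt 0 l p hp
    simp only [beq_iff_eq]
    omega
  simp only [PySem.Dict.insert, hc, Bool.false_eq_true, if_false]
  simp [pvED, pvEnumFrom_append]

theorem pvPhi_contains (g : PySem.Dict String (List (List (String × String)))) (h : String) :
    (pvPhi g).contains h = g.contains h := by
  simp [pvPhi, PySem.Dict.contains, List.any_map, Function.comp_def]

theorem pvPhi_get? (g : PySem.Dict String (List (List (String × String)))) (h : String) :
    (pvPhi g).get? h = (g.get? h).map pvED := by
  simp only [pvPhi, PySem.Dict.get?, List.find?_map, Function.comp_def]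
  cases hf : g.items.find? (fun p => p.1 == h) <;> simp_all

theorem pvPhi_insert (g : PySem.Dict String (List (List (String × String)))) (h : String)
    (v : List (List (String × String))) :
    pvPhi (g.insert h v) = (pvPhi g).insert h (pvED v) := by
  apply PySem.Dict.ext
  by_cases hc : g.contains h = true
  · have h1 : (g.insert h v).items = g.items.map (fun p => if p.1 == h then (h, v) else p) :=
      PySem.Dict.items_insert_of_contains g v hc
    have h2 : ((pvPhi g).insert h (pvED v)).items
        = (pvPhi g).items.map (fun p => if p.1 == h then (h, pvED v) else p) :=
      PySem.Dict.items_insert_of_contains (pvPhi g) (pvED v) (by rw [pvPhi_contains]; exact hc)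
    rw [h2]
    show ((g.insert h v).items.map (fun p => (p.1, pvED p.2)))
        = (pvPhi g).items.map (fun p => if p.1 == h then (h, pvED v) else p)
    rw [h1]
    show _ = (g.items.map (fun p => (p.1, pvED p.2))).map (fun p => if p.1 == h then (h, pvED v) else p)
    rw [List.map_map, List.map_map]
    apply List.map_congr_left
    intro p _
    by_cases hb : p.1 = h
    · simp [hb]
    · simp [hb]
  · rw [Bool.not_eq_true] at hc
    have h1 : (g.insert h v).items = g.items ++ [(h, v)] :=
      PySem.Dict.items_insert_of_not_contains g v hc
    have h2 : ((pvPhi g).insert h (pvED v)).items = (pvPhi g).items ++ [(h, pvED v)] :=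
      PySem.Dict.items_insert_of_not_contains (pvPhi g) (pvED v) (by rw [pvPhi_contains]; exact hc)
    rw [h2]
    show ((g.insert h v).items.map (fun p => (p.1, pvED p.2))) = _
    rw [h1]
    simp [pvPhi]

theorem pvStep (g : PySem.Dict String (List (List (String × String)))) (e : List (String × String)) :
    pvAddEntry (pvPhi g) e = pvPhi (pvGroupStep g e) := by
  by_cases hc : g.contains (pvHash e) = true
  · obtain ⟨l, hl⟩ : ∃ l, g.get? (pvHash e) = some l := by
      have := PySem.Dict.contains_eq_isSome_get? g (pvHash e)
      rw [hc] at this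
      cases hg : g.get? (pvHash e) with
      | none => rw [hg] at this; simp at this
      | some l => exact ⟨l, rfl⟩
    have hΦc : (pvPhi g).contains (pvHash e) = true := by rw [pvPhi_contains]; exact hc
    simp only [pvAddEntry, pvGroupStep, hc, if_true, PySem.Dict.setdefault, hΦc,
      PySem.Dict.getD, pvPhi_get?, hl, Option.map_some, Option.getD_some]
    rw [show (pvED l).size = l.length from by simp [pvED, PySem.Dict.size, pvEnumFrom_length]]
    rw [pvED_insert, pvPhi_insert]
  · rw [Bool.not_eq_true] at hc
    have hΦc : (pvPhi g).contains (pvHash e) = false := by rw [pvPhi_contains]; exact hc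
    have hcitems : ∀ p ∈ g.items, ¬ (p.1 == pvHash e) = true := by
      rw [PySem.Dict.contains, List.any_eq_false] at hc
      exact hc
    have hset : (pvPhi g).setdefault (pvHash e) PySem.Dict.empty
        = pvPhi (PySem.Dict.mk (g.items ++ [(pvHash e, [])])) := by
      simp only [PySem.Dict.setdefault, hΦc, Bool.false_eq_true, if_false]
      simp [pvPhi, pvED, pvEnumFrom, PySem.Dict.empty]
    have hget : (PySem.Dict.mk (g.items ++ [(pvHash e, [])])).get? (pvHash e) = some [] := by
      simp only [PySem.Dict.get?, List.find?_append]
      have : g.items.find? (fun p => p.1 == pvHash e) = none := by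
        rw [List.find?_eq_none]
        exact hcitems
      simp [this]
    have hins : (PySem.Dict.mk (g.items ++ [(pvHash e, [])])).insert (pvHash e) [e]
        = g.insert (pvHash e) [e] := by
      have hcv : (PySem.Dict.mk (g.items ++ [(pvHash e, [])])).contains (pvHash e) = true := by
        simp [PySem.Dict.contains]
      simp only [PySem.Dict.insert, hcv, if_true, hc, Bool.false_eq_true, if_false]
      have hid : g.items.map (fun p => if (p.1 == pvHash e) = true then (pvHash e, [e]) else p)
          = g.items.map id := List.map_congr_left (fun p hp => by simp [hcitems p hp])
      congr 1
      rw [List.map_append, hid, List.map_id]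
      simp
    simp only [pvAddEntry, pvGroupStep, hc, Bool.false_eq_true, if_false, hset, pvPhi_get?,
      PySem.Dict.getD, hget, Option.map_some, Option.getD_some]
    rw [show (pvED []).size = 0 from rfl]
    rw [show (pvED []).insert ((0 : Nat) : Int) e = pvED ([] ++ [e]) from pvED_insert [] e]
    simp only [List.nil_append]
    rw [← hins, pvPhi_insert]

theorem pvFold (l : List (List (String × String)))
    (g : PySem.Dict String (List (List (String × String)))) :
    l.foldl pvAddEntry (pvPhi g) = pvPhi (l.foldl pvGroupStep g) := by
  induction l generalizing g with
  | nil => rfl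
  | cons e xs ih => simp only [List.foldl_cons, pvStep, ih]

theorem pvKeyOrder_append (l : List (List (String × String))) (e : List (String × String)) :
    pvKeyOrder (l ++ [e])
      = if (pvKeyOrder l).contains (pvHash e) then pvKeyOrder l
        else pvKeyOrder l ++ [pvHash e] := by
  simp [pvKeyOrder, List.foldl_append]

theorem pvMem_keyOrder (l : List (List (String × String))) :
    ∀ h, h ∈ pvKeyOrder l ↔ h ∈ l.map pvHash := by
  induction l using List.reverseRecOn with
  | nil => simp [pvKeyOrder]
  | append_singleton xs e ih =>
    intro h
    rw [pvKeyOrder_append]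
    by_cases hc : (pvKeyOrder xs).contains (pvHash e) = true
    · rw [if_pos hc]
      have hm : pvHash e ∈ xs.map pvHash := (ih _).mp (by simpa using hc)
      simp only [ih h, List.map_append, List.map_cons, List.map_nil, List.mem_append,
        List.mem_cons, List.not_mem_nil, or_false]
      constructor
      · exact Or.inl
      · rintro (hx | rfl)
        · exact hx
        · exact hm
    · rw [if_neg hc]
      simp [ih h]

theorem pvKeyOrder_nodup (l : List (List (String × String))) : (pvKeyOrder l).Nodup := by
  induction l using List.reverseRecOn with
  | nil => simp [pvKeyOrder]
  | append_singleton xs e ih =>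
    rw [pvKeyOrder_append]
    by_cases hc : (pvKeyOrder xs).contains (pvHash e) = true
    · rw [if_pos hc]; exact ih
    · rw [if_neg hc]
      refine List.Nodup.append ih (List.nodup_singleton _) ?_
      intro a ha hb
      simp only [List.mem_singleton] at hb
      subst hb
      exact (by simpa using hc : pvHash e ∉ pvKeyOrder xs) ha

-- the grouping fold, characterised: items = first-occurrence key order paired with per-key filters
theorem pvGroupFold_items (l : List (List (String × String))) :
    (l.foldl pvGroupStep PySem.Dict.empty).items
      = (pvKeyOrder l).map (fun h => (h, l.filter (fun e => pvHash e == h))) := by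
  induction l using List.reverseRecOn with
  | nil => rfl
  | append_singleton xs e ih =>
    rw [List.foldl_append, List.foldl_cons, List.foldl_nil]
    set st := xs.foldl pvGroupStep PySem.Dict.empty with hst
    have hcontains : st.contains (pvHash e) = (pvKeyOrder xs).contains (pvHash e) := by
      simp [PySem.Dict.contains, ih, List.any_map, Function.comp_def,
        List.any_beq']
    by_cases hc : (pvKeyOrder xs).contains (pvHash e) = true
    · -- existing hash: in-place update of its bucket
      have hmem : pvHash e ∈ pvKeyOrder xs := by simpa using hc
      have hstc : st.contains (pvHash e) = true := by rw [hcontains]; exact hc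
      have hgetD : st.getD (pvHash e) [] = xs.filter (fun e' => pvHash e' == pvHash e) := by
        apply PySem.Dict.getD_of_mem_items
        · rw [ih]; exact List.mem_map_of_mem hmem
        · show (st.items.map Prod.fst).Nodup
          rw [ih, List.map_map]
          simpa [Function.comp_def] using pvKeyOrder_nodup xs
      simp only [pvGroupStep]
      rw [if_pos hstc]
      rw [PySem.Dict.items_insert_of_contains _ _ hstc]
      rw [ih, hgetD, List.map_map, pvKeyOrder_append, if_pos hc]
      apply List.map_congr_left
      intro h' _
      by_cases hb : h' = pvHash e
      · subst hb
        simp [List.filter_append]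
      · have hne : ¬ (pvHash e == h') = true := by simpa using (Ne.symm hb)
        simp [hb, List.filter_append, hne]
    · -- fresh hash: appended at the end with a singleton bucket
      have hnot : pvHash e ∉ pvKeyOrder xs := by simpa using hc
      have hstc : ¬ st.contains (pvHash e) = true := by rw [hcontains]; exact hc
      have hstf : st.contains (pvHash e) = false := by simpa using hstc
      have hfilter_nil : xs.filter (fun e' => pvHash e' == pvHash e) = [] := by
        rw [List.filter_eq_nil_iff]
        intro e' he' hbe
        have heq : pvHash e' = pvHash e := by simpa using hbe
        exact hnot ((pvMem_keyOrder xs (pvHash e)).2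
          (heq ▸ List.mem_map_of_mem (f := pvHash) he'))
      simp only [pvGroupStep]
      rw [if_neg hstc]
      rw [PySem.Dict.items_insert_of_not_contains _ _ hstf]
      rw [ih, pvKeyOrder_append, if_neg hc]
      simp only [List.map_append, List.map_cons, List.map_nil]
      congr 1
      · apply List.map_congr_left
        intro h' hh'
        have hb : ¬ (pvHash e == h') = true := by
          simp only [beq_iff_eq]
          rintro rfl
          exact hnot hh'
        simp [List.filter_append, hb]
      · simp [List.filter_append, hfilter_nil]

-- ===== VERDICT (by name: the statement is the Claim_ definition above) =====
theorem combine_records_spec : Claim_equal_combine_records := by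
  intro token_tx internal_tx normal_tx _ _
  unfold Spec_combine_records combine_records combine_records_alt
  simp only [List.foldl_cons, List.foldl_nil]
  rw [show (PySem.Dict.empty : PySem.Dict String (PySem.Dict Int (List (String × String))))
      = pvPhi PySem.Dict.empty from rfl]
  rw [pvFold, pvFold, pvFold]
  rw [show ((PySem.Dict.mk normal_tx).getD "result" []).foldl pvGroupStep
        (((PySem.Dict.mk internal_tx).getD "result" []).foldl pvGroupStep
          (((PySem.Dict.mk token_tx).getD "result" []).foldl pvGroupStep PySem.Dict.empty))
      = ((PySem.Dict.mk token_tx).getD "result" [] ++ (PySem.Dict.mk internal_tx).getD "result" []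
          ++ (PySem.Dict.mk normal_tx).getD "result" []).foldl pvGroupStep PySem.Dict.empty from by
    simp [List.foldl_append]]
  simp only [pvPhi, pvGroupFold_items]
  rw [show pvKeyOrder ((PySem.Dict.mk token_tx).getD "result" [] ++ (PySem.Dict.mk internal_tx).getD "result" []
        ++ (PySem.Dict.mk normal_tx).getD "result" [])
      = ((PySem.Dict.mk token_tx).getD "result" [] ++ (PySem.Dict.mk internal_tx).getD "result" []
        ++ (PySem.Dict.mk normal_tx).getD "result" []).foldl
          (fun o e => if o.contains (pvHash e) then o else o ++ [pvHash e]) [] from rfl]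
  simp only [List.map_map, Function.comp_def]
  rfl
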